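-- pv_equiv track=rewrite | github.com/Blaziton456/MoodMaps | app.py | safe_username
-- ===== SOURCE A (Python) =====
-- def safe_username(s: str):
--     s = (s or "").strip().lower()
--     allowed = "abcdefghijklmnopqrstuvwxyz0123456789_"
--     if not s:
--         return ""
--     if " " in s:
--         return ""
--     if len(s) < 3:
--         return ""
--     if any(ch not in allowed for ch in s):
--         return ""
--     return s
-- ===== SOURCE B (Python) =====
-- def safe_username(s: str):
--     # DFA over the normalized string: states 0,1,2 count matched chars, 3 = "enough",
--     # -1 = dead (disallowed char seen). Accept iff the run ends in state 3.
--     t = (s or "").strip().lower()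
--     state = 0
--     for c in t:
--         if state == -1:
--             break
--         if c in "abcdefghijklmnopqrstuvwxyz0123456789_":
--             state = min(state + 1, 3)
--         else:
--             state = -1
--     return t if state == 3 else ""
-- ===== Notes on version B (the rewrite author's own statement) =====
-- stated objective: alternative
-- what changed: B replaces A's chain of four guard returns plus a separate any(...) membership scan with a single finite-automaton run over the normalized string (an integer state counting matched characters, capped at 3, with an absorbing dead state), accepting iff the run ends in the accepting state; the empty/space/short guards are all subsumed by the automaton.
import Mathlib
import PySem

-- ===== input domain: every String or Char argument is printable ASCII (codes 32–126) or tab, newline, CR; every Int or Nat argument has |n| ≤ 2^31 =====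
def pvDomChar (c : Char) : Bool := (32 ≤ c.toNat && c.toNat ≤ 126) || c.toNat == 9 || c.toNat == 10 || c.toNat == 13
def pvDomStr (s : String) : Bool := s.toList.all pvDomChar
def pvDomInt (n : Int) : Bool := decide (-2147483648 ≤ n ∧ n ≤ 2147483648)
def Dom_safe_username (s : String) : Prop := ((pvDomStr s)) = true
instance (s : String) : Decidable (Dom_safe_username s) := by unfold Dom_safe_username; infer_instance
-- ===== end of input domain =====

-- B replaces A's guard chain + any(...) scan with a single finite-automaton run
-- (integer state counting matched characters, absorbing dead state); same values.

-- ===== PORT A =====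
def safe_username (s : String) : String :=
  -- (s or "") is the identity on strings ("" is falsy and maps to ""); then .strip().lower()
  let s := PySem.Str.lower (PySem.Str.strip s)
  let allowed := "abcdefghijklmnopqrstuvwxyz0123456789_"
  if s = "" then ""
  else if PySem.Str.isIn " " s then ""
  else if PySem.Str.len s < 3 then ""
  else if s.toList.any (fun ch => !(PySem.Str.isIn (String.ofList [ch]) allowed)) then ""
  else s

-- ===== PORT B =====
-- one DFA transition of Source B's loop body; state -1 is absorbing (models the `break`)
def pvStep (st : Int) (c : Char) : Int :=
  if st = -1 then -1
  else if PySem.Str.isIn (String.ofList [c]) "abcdefghijklmnopqrstuvwxyz0123456789_"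
  then min (st + 1) 3 else -1

def safe_username_alt (s : String) : String :=
  let t := PySem.Str.lower (PySem.Str.strip s)
  let state := t.toList.foldl pvStep 0
  if state = 3 then t else ""

-- ===== PRECONDITION & SPEC =====
def Spec_safe_username (s : String) (out : String) : Prop := out = safe_username_alt s
instance (s : String) (out : String) : Decidable (Spec_safe_username s out) := by unfold Spec_safe_username; infer_instance

-- ===== CLAIM (what is proved, stated in full; the proofs are below) =====
def Claim_equal_safe_username : Prop := ∀ (s : String), Dom_safe_username s → Spec_safe_username s (safe_username s)

-- ===== LEMMAS AND PROOFS =====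

-- 'c in s' for a single character is just membership of c among s's characters
lemma isIn_single (c : Char) (s : String) :
    PySem.Str.isIn (String.ofList [c]) s = s.toList.contains c := by
  rw [Bool.eq_iff_iff, PySem.Str.isIn_iff_infix, List.contains_iff_mem]
  have h : (String.ofList [c]).toList = [c] := by simp
  rw [h]
  constructor
  · intro h; exact h.mem (by simp)
  · intro h
    obtain ⟨l, r, hs⟩ := List.mem_iff_append.mp h
    exact ⟨l, r, by rw [hs]; simp⟩

-- the dead state is absorbing
lemma fold_dead (l : List Char) : l.foldl pvStep (-1) = -1 := by
  induction l with
  | nil => rfl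
  | cons c l ih => simpa [pvStep] using ih

-- characterization of the DFA run from any live state
lemma fold_char (l : List Char) : ∀ (st : Int), 0 ≤ st → st ≤ 3 →
    l.foldl pvStep st
      = if l.all (fun c =>
            PySem.Str.isIn (String.ofList [c]) "abcdefghijklmnopqrstuvwxyz0123456789_")
        then min (st + l.length) 3 else -1 := by
  induction l with
  | nil =>
    intro st h0 h3
    simp only [List.foldl_nil, List.all_nil, List.length_nil, Nat.cast_zero, add_zero, if_true]
    exact (min_eq_left h3).symm
  | cons c l ih =>
    intro st h0 h3
    simp only [List.foldl_cons, List.all_cons]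
    by_cases hc : PySem.Str.isIn (String.ofList [c]) "abcdefghijklmnopqrstuvwxyz0123456789_" = true
    · have hstep : pvStep st c = min (st + 1) 3 := by
        unfold pvStep; rw [if_neg (by omega), if_pos hc]
      rw [hstep, ih (min (st + 1) 3) (by omega) (by omega)]
      simp only [hc, Bool.true_and, List.length_cons]
      split_ifs
      · push_cast; omega
      · rfl
    · have hstep : pvStep st c = -1 := by
        unfold pvStep; rw [if_neg (by omega), if_neg hc]
      rw [hstep, fold_dead,
        if_neg (by simp only [Bool.and_eq_true]; exact fun h => hc h.1)]

-- both programs reduce to the same canonical test on the normalized string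
lemma key (t : String) :
    (if t = "" then ""
     else if PySem.Str.isIn " " t then ""
     else if PySem.Str.len t < 3 then ""
     else if t.toList.any (fun ch =>
         !(PySem.Str.isIn (String.ofList [ch]) "abcdefghijklmnopqrstuvwxyz0123456789_")) then ""
     else t)
    = (if t.toList.foldl pvStep 0 = 3 then t else "") := by
  rw [fold_char t.toList 0 (by norm_num) (by norm_num)]
  have hlen : PySem.Str.len t = (t.toList.length : Int) := by simp [PySem.Str.len_eq]
  by_cases hall : (t.toList.all fun c =>
      PySem.Str.isIn (String.ofList [c]) "abcdefghijklmnopqrstuvwxyz0123456789_") = true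
  · rw [if_pos hall]
    have hany : (t.toList.any fun ch =>
        !(PySem.Str.isIn (String.ofList [ch]) "abcdefghijklmnopqrstuvwxyz0123456789_")) = false := by
      rw [List.any_eq_not_all_not]
      simp only [Bool.not_not, hall, Bool.not_true]
    by_cases h3 : 3 ≤ t.toList.length
    · have hmin : min ((0 : Int) + t.toList.length) 3 = 3 := by push_cast; omega
      rw [hmin, if_pos rfl]
      have hne : ¬ t = "" := by
        intro h; rw [h] at h3; simp at h3
      have hsp : PySem.Str.isIn " " t = false := by
        have hws : (" " : String) = String.ofList [' '] := rfl
        rw [hws, isIn_single, Bool.eq_false_iff, Ne, List.contains_iff_mem]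
        intro hmem
        have := List.all_eq_true.mp hall ' ' hmem
        exact absurd this (by decide)
      rw [if_neg hne, if_neg (by rw [hsp]; exact Bool.false_ne_true),
        if_neg (by rw [hlen]; push_cast; omega), hany]
      simp
    · have hmin : ¬ min ((0 : Int) + t.toList.length) 3 = 3 := by push_cast; omega
      rw [if_neg hmin]
      by_cases h1 : t = ""
      · rw [if_pos h1]
      rw [if_neg h1]
      by_cases h2 : PySem.Str.isIn " " t = true
      · rw [if_pos h2]
      rw [if_neg h2, if_pos (by rw [hlen]; push_cast; omega)]
  · rw [if_neg hall]
    have hany : (t.toList.any fun ch =>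
        !(PySem.Str.isIn (String.ofList [ch]) "abcdefghijklmnopqrstuvwxyz0123456789_")) = true := by
      rw [List.any_eq_not_all_not]
      simp only [Bool.not_not]
      cases h : (t.toList.all fun c =>
          PySem.Str.isIn (String.ofList [c]) "abcdefghijklmnopqrstuvwxyz0123456789_") with
      | false => rfl
      | true => exact absurd h hall
    by_cases h1 : t = ""
    · rw [if_pos h1]; simp
    rw [if_neg h1]
    by_cases h2 : PySem.Str.isIn " " t = true
    · rw [if_pos h2]; simp
    rw [if_neg h2]
    by_cases h3 : PySem.Str.len t < 3
    · rw [if_pos h3]; simp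
    rw [if_neg h3, if_pos hany]
    simp

-- ===== VERDICT =====
theorem safe_username_spec : Claim_equal_safe_username := by
  intro s _
  show safe_username s = safe_username_alt s
  exact key (PySem.Str.lower (PySem.Str.strip s))
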